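-- pv_equiv track=rewrite | github.com/faithokamoto/centromere-haplotype-sampling-pipeline | data_scripts/diploid_data.py | find_all_diplotypes
-- ===== SOURCE A (Python) =====
-- from typing import Dict, Tuple # Type hinting
--
-- Diplotype = Tuple[str, str]
--
-- def find_all_diplotypes(cur_table: Dict[str, str]) -> Dict[str, Diplotype]:
--     """Convert a {haplotype : cenhap} table to a {sample : cenhaps} table."""
--     all_samples = {hap.split('.')[0] for hap in cur_table.keys()}
--     sample_to_true = dict()
--     for sample in all_samples:
--         if f'{sample}.1' in cur_table and f'{sample}.2' in cur_table:
--             cenhap1 = cur_table[f'{sample}.1']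
--             cenhap2 = cur_table[f'{sample}.2']
--             sample_to_true[sample] = tuple(sorted([cenhap1, cenhap2]))
--     return sample_to_true
-- ===== SOURCE B (Python) =====
-- def find_all_diplotypes(cur_table):
--     """Convert a {haplotype : cenhap} table to a {sample : cenhaps} table."""
--     # Hash join keyed by suffix: bucket values into two flat sample->value maps
--     # ('.1' keys vs '.2' keys), then join the two maps in original key order.
--     ones = {}
--     twos = {}
--     for key, value in cur_table.items():
--         parts = key.split('.', 1)
--         if len(parts) == 2:
--             if parts[1] == '1':
--                 ones.setdefault(parts[0], value)
--             elif parts[1] == '2':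
--                 twos.setdefault(parts[0], value)
--     result = {}
--     for key in cur_table:
--         sample = key.split('.', 1)[0]
--         if sample not in result and sample in ones and sample in twos:
--             c1, c2 = ones[sample], twos[sample]
--             result[sample] = (min(c1, c2), max(c1, c2))
--     return result
-- ===== Notes on version B (the rewrite author's own statement) =====
-- stated objective: alternative
-- what changed: B replaces A's set-of-prefixes plus reconstructed-key lookups into the input table by a hash join keyed by suffix: one pass buckets values into two flat sample->value maps (keys of shape 'sample.1' vs 'sample.2'), then a join pass over the original keys emits each first-seen sample found in both maps with its (min,max) pair; A's dict is never indexed by rebuilt keys and no sample set is materialised.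
import Mathlib
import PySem

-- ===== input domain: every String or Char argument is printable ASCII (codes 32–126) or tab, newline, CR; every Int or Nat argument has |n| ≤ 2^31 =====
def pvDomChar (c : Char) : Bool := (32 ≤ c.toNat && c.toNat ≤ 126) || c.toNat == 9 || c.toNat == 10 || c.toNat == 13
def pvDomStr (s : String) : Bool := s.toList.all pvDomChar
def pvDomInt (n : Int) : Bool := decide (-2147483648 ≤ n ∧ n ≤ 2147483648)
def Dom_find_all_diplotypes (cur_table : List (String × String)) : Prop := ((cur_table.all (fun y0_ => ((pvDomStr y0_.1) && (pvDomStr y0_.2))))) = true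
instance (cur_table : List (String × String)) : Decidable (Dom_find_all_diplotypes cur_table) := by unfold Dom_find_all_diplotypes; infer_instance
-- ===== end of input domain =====

-- B replaces A's set-of-prefixes + reconstructed-key lookups by a hash join keyed by suffix
-- (two flat sample->value maps joined in original key order); alternative decomposition, same cost.

-- ===== PORT A =====
-- tuple(sorted([cenhap1, cenhap2])): Python's stable sort of a 2-element list, via PySem.List.sorted
def pairSorted (c1 c2 : String) : String × String :=
  match PySem.List.sorted [c1, c2] (fun x => x) false with
  | [a, b] => (a, b)
  | _ => (c1, c2)

-- loop body: if f'{sample}.1' in cur_table and f'{sample}.2' in cur_table: sample_to_true[sample] = tuple(sorted(...))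
def stepA (d : PySem.Dict String String) (acc : PySem.Dict String (String × String)) (sample : String) :
    PySem.Dict String (String × String) :=
  match d.get? (sample ++ ".1"), d.get? (sample ++ ".2") with
  | some c1, some c2 => acc.insert sample (pairSorted c1 c2)
  | _, _ => acc

def find_all_diplotypes (cur_table : List (String × String)) : List (String × String × String) :=
  let d : PySem.Dict String String := PySem.Dict.mk cur_table
  -- all_samples = {hap.split('.')[0] for hap in cur_table.keys()}
  let all_samples : PySem.Set String :=
    PySem.Set.ofList (cur_table.map (fun kv => ((PySem.Str.split? kv.1 ".").getD []).headD ""))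
  (all_samples.foldl (stepA d) PySem.Dict.empty).items

-- ===== PORT B =====
-- bucketing pass body: parts = key.split('.', 1); if len(parts) == 2: setdefault into ones / twos by suffix
def bucketStep (acc : PySem.Dict String String × PySem.Dict String String) (kv : String × String) :
    PySem.Dict String String × PySem.Dict String String :=
  match (PySem.Str.splitMax? kv.1 "." 1).getD [] with
  | [p, suf] =>
    if suf = "1" then (acc.1.setdefault p kv.2, acc.2)
    else if suf = "2" then (acc.1, acc.2.setdefault p kv.2)
    else acc
  | _ => acc

-- join pass body: sample = key.split('.', 1)[0];
-- if sample not in result and sample in ones and sample in twos: result[sample] = (min, max)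
def joinStep (ones twos : PySem.Dict String String) (r : PySem.Dict String (String × String))
    (key : String) : PySem.Dict String (String × String) :=
  let sample := ((PySem.Str.splitMax? key "." 1).getD []).headD ""
  if r.contains sample then r
  else
    match ones.get? sample, twos.get? sample with
    | some c1, some c2 => r.insert sample (if c1 ≤ c2 then (c1, c2) else (c2, c1))
    | _, _ => r

def find_all_diplotypes_alt (cur_table : List (String × String)) : List (String × String × String) :=
  let bt := cur_table.foldl bucketStep (PySem.Dict.empty, PySem.Dict.empty)
  ((cur_table.map (·.1)).foldl (joinStep bt.1 bt.2) PySem.Dict.empty).items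

-- ===== PRECONDITION & SPEC =====
def Spec_find_all_diplotypes (cur_table : List (String × String)) (out : List (String × String × String)) : Prop := out = find_all_diplotypes_alt cur_table
instance (cur_table : List (String × String)) (out : List (String × String × String)) : Decidable (Spec_find_all_diplotypes cur_table out) := by unfold Spec_find_all_diplotypes; infer_instance

-- ===== CLAIM (what is proved, stated in full; the proofs are below) =====
def Claim_equal_find_all_diplotypes : Prop := ∀ (cur_table : List (String × String)), Dom_find_all_diplotypes cur_table → Spec_find_all_diplotypes cur_table (find_all_diplotypes cur_table)

-- ===== LEMMAS AND PROOFS =====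

-- the semantic prefix: characters of k before the first '.'
def prefS (k : String) : String := String.ofList (k.toList.takeWhile (· ≠ '.'))

-- splitOn.go with enough fuel: the first produced piece (under the accumulator) is cur.reverse ++ takeWhile
lemma go_on_head (fuel : Nat) (l cur : List Char) (acc : List (List Char)) (h : l.length ≤ fuel) :
    ∃ t, PySem.Chars.splitOn.go ['.'] fuel l cur acc =
      acc.reverse ++ (cur.reverse ++ l.takeWhile (· ≠ '.')) :: t := by
  induction fuel generalizing l cur acc with
  | zero =>
    have : l = [] := by cases l <;> simp_all
    subst this
    exact ⟨[], by rw [PySem.Chars.splitOn.go]; simp⟩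
  | succ n ih =>
    cases l with
    | nil => exact ⟨[], by rw [PySem.Chars.splitOn.go] <;> simp⟩
    | cons c rest =>
      rw [PySem.Chars.splitOn.go]
      by_cases hc : c = '.'
      · subst hc
        simp only [List.isPrefixOf, beq_self_eq_true, Bool.true_and, if_true]
        obtain ⟨t, ht⟩ := ih rest [] (cur.reverse :: acc) (by simpa using Nat.le_of_succ_le_succ h)
        refine ⟨List.takeWhile (fun x => decide (x ≠ '.')) rest :: t, ?_⟩
        have goal1 : List.drop ['.'].length ('.' :: rest) = rest := by simp
        rw [goal1, ht]
        simp [List.takeWhile]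
      · have hp : (['.'].isPrefixOf (c :: rest)) = false := by
          simp [List.isPrefixOf]; exact fun hh => hc hh.symm
        simp only [hp, List.length_cons, List.drop_succ_cons, Bool.false_eq_true, if_false]
        obtain ⟨t, ht⟩ := ih rest (c :: cur) acc (by simpa using Nat.le_of_succ_le_succ h)
        refine ⟨t, ?_⟩
        rw [ht]
        simp [List.takeWhile, hc]

lemma go_max_zero (fuel : Nat) (l cur : List Char) (acc : List (List Char)) :
    PySem.Chars.splitOnMax.go ['.'] fuel 0 l cur acc = acc.reverse ++ [cur.reverse ++ l] := by
  cases fuel with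
  | zero => rw [PySem.Chars.splitOnMax.go]; simp
  | succ n => cases l with
    | nil => rw [PySem.Chars.splitOnMax.go] <;> simp
    | cons c rest => rw [PySem.Chars.splitOnMax.go]; simp

lemma go_max_one (fuel : Nat) (l cur : List Char) (acc : List (List Char)) (h : l.length ≤ fuel) :
    PySem.Chars.splitOnMax.go ['.'] fuel 1 l cur acc =
      acc.reverse ++ (if '.' ∈ l then [cur.reverse ++ l.takeWhile (· ≠ '.'), (l.dropWhile (· ≠ '.')).tail]
                      else [cur.reverse ++ l]) := by
  induction fuel generalizing l cur acc with
  | zero =>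
    have : l = [] := by cases l <;> simp_all
    subst this
    rw [PySem.Chars.splitOnMax.go]; simp
  | succ n ih =>
    cases l with
    | nil => rw [PySem.Chars.splitOnMax.go] <;> simp
    | cons c rest =>
      rw [PySem.Chars.splitOnMax.go]
      by_cases hc : c = '.'
      · subst hc
        simp only [List.isPrefixOf, beq_self_eq_true, Bool.true_and, if_true]
        simp only [show ¬((1:Nat) = 0) by decide, if_false]
        rw [show (1 : Nat) - 1 = 0 from rfl, go_max_zero]
        simp [List.takeWhile, List.dropWhile]
      · have hp : (['.'].isPrefixOf (c :: rest)) = false := by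
          simp [List.isPrefixOf]; exact fun hh => hc hh.symm
        simp only [hp, Bool.false_eq_true, if_false]
        have : ¬((1:Nat) = 0) := by decide
        simp only [this, if_false]
        rw [ih rest (c :: cur) acc (by simpa using Nat.le_of_succ_le_succ h)]
        simp [List.takeWhile, List.dropWhile, hc, Ne.symm hc]

lemma splitA_head (k : String) : ((PySem.Str.split? k ".").getD []).headD "" = prefS k := by
  have hb := PySem.Str.split?_map k "."
  rw [show (".".toList) = ['.'] by decide] at hb
  obtain ⟨t, ht⟩ := go_on_head (k.toList.length + 1) k.toList [] [] (by omega)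
  simp only [List.reverse_nil, List.nil_append] at ht
  simp only [PySem.Chars.split?, PySem.Chars.splitOn, List.isEmpty_cons, if_false,
    Bool.false_eq_true, ht] at hb
  cases hys : PySem.Str.split? k "." with
  | none => rw [hys] at hb; simp at hb
  | some ys =>
    rw [hys] at hb
    cases ys with
    | nil => simp at hb
    | cons y ys' =>
      simp only [Option.map_some, Option.some.injEq, List.map_cons, List.cons.injEq] at hb
      simp only [Option.getD_some, List.headD_cons, prefS]
      rw [← String.toList_inj, hb.1, String.toList_ofList]

lemma splitB_parts (k : String) :
    (PySem.Str.splitMax? k "." 1).getD [] =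
      if '.' ∈ k.toList then [prefS k, String.ofList ((k.toList.dropWhile (· ≠ '.')).tail)]
      else [k] := by
  have hb := PySem.Str.splitMax?_map k "." 1
  rw [show (".".toList) = ['.'] by decide] at hb
  have hgo := go_max_one (k.toList.length + 1) k.toList [] [] (by omega)
  simp only [List.reverse_nil, List.nil_append] at hgo
  simp only [PySem.Chars.splitMax?, PySem.Chars.splitOnMax, List.isEmpty_cons, if_false,
    Bool.false_eq_true, show ¬((1:Int) < 0) by decide, show (1:Int).toNat = 1 from rfl, hgo] at hb
  cases hys : PySem.Str.splitMax? k "." 1 with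
  | none => rw [hys] at hb; simp at hb
  | some ys =>
    rw [hys] at hb
    by_cases hdot : '.' ∈ k.toList
    · simp only [hdot, if_true, Option.map_some, Option.some.injEq] at hb
      cases ys with
      | nil => simp at hb
      | cons a ys' => cases ys' with
        | nil => simp at hb
        | cons b ys'' =>
          cases ys'' with
          | cons c w => simp at hb
          | nil =>
            simp only [List.map_cons, List.map_nil, List.cons.injEq, and_true] at hb
            simp only [hdot, if_true, Option.getD_some, List.cons.injEq, and_true]
            refine ⟨?_, ?_⟩
            · rw [← String.toList_inj, hb.1]; simp [prefS, String.toList_ofList]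
            · rw [← String.toList_inj, hb.2, String.toList_ofList]
    · simp only [hdot, if_false, Option.map_some, Option.some.injEq] at hb
      cases ys with
      | nil => simp at hb
      | cons a ys' => cases ys' with
        | cons b w => simp at hb
        | nil =>
          simp only [List.map_cons, List.map_nil, List.cons.injEq, and_true] at hb
          simp only [hdot, if_false, Option.getD_some, List.cons.injEq, and_true]
          rw [← String.toList_inj, hb]

lemma append_dot_toList (p s : String) : (p ++ "." ++ s).toList = p.toList ++ '.' :: s.toList := by
  simp [String.toList_append]

lemma key_eq_append_iff (k p s : String) :
    k = p ++ "." ++ s ↔ k.toList = p.toList ++ '.' :: s.toList := by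
  rw [← String.toList_inj, append_dot_toList]

lemma prefS_no_dot (k : String) : '.' ∉ (prefS k).toList := by
  simp only [prefS, String.toList_ofList]
  intro h
  have := List.mem_takeWhile_imp h
  simp at this

-- a key of shape p ++ '.' ++ s with p dot-free has prefix p and remainder s
lemma shape_take (p : List Char) (r : List Char) (hp : '.' ∉ p) :
    (p ++ '.' :: r).takeWhile (· ≠ '.') = p ∧ (p ++ '.' :: r).dropWhile (· ≠ '.') = '.' :: r := by
  have hpos : ∀ c ∈ p, (fun x => decide (x ≠ '.')) c = true := by
    intro c hc; simp only [ne_eq, decide_eq_true_eq]; rintro rfl; exact hp hc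
  constructor
  · rw [List.takeWhile_append_of_pos hpos]; simp
  · rw [List.dropWhile_append_of_pos hpos]; simp

-- pairSorted is the ordered pair: A's tuple(sorted(...)) equals B's (min, max)
lemma pairSorted_eq (c1 c2 : String) :
    pairSorted c1 c2 = if c1 ≤ c2 then (c1, c2) else (c2, c1) := by
  rw [pairSorted, PySem.List.sorted_eq_foldl_insertBy]
  simp only [List.foldl_cons, List.foldl_nil, PySem.List.insertBy]
  by_cases h : c1 ≤ c2
  · rw [if_neg (by simp [not_lt.mpr h])]
    simp [h]
  · rw [if_pos (by simp [lt_of_not_ge h])]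
    simp [h]

lemma dropWhile_dot (l : List Char) (h : '.' ∈ l) :
    l.dropWhile (· ≠ '.') = '.' :: (l.dropWhile (· ≠ '.')).tail := by
  induction l with
  | nil => simp at h
  | cons c rest ih =>
    by_cases hc : c = '.'
    · subst hc; simp [List.dropWhile]
    · rw [List.dropWhile_cons_of_pos (by simp [hc])]
      refine ih ?_
      rcases List.mem_cons.mp h with h1 | h1
      · exact absurd h1.symm hc
      · exact h1

lemma get?_mk_append_one {κ ν : Type} [BEq κ] [LawfulBEq κ] [DecidableEq κ] (l : List (κ × ν)) (x : κ × ν) (k : κ) :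
    (PySem.Dict.mk (l ++ [x])).get? k = ((PySem.Dict.mk l).get? k).or (if x.1 = k then some x.2 else none) := by
  simp only [PySem.Dict.get?, List.find?_append]
  cases h : List.find? (fun p => p.1 == k) l
  · simp only [Option.map_none, Option.none_or]
    simp [List.find?]
    split <;> simp_all
  · simp

lemma ofList_append_one {α : Type} [BEq α] [LawfulBEq α] (xs : List α) (x : α) :
    PySem.Set.ofList (xs ++ [x]) = PySem.Set.add (PySem.Set.ofList xs) x := by
  rw [PySem.Set.ofList_eq_foldl, PySem.Set.ofList_eq_foldl, List.foldl_append]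
  rfl

lemma prefS_of_no_dot (k : String) (h : '.' ∉ k.toList) : prefS k = k := by
  rw [prefS, List.takeWhile_eq_self_iff.mpr (by intro x hx; simp; rintro rfl; exact h hx),
    String.ofList_toList]

lemma key_decomp (k : String) (h : '.' ∈ k.toList) :
    k = prefS k ++ "." ++ String.ofList ((k.toList.dropWhile (· ≠ '.')).tail) := by
  rw [key_eq_append_iff]
  simp only [prefS, String.toList_ofList]
  conv_lhs => rw [← List.takeWhile_append_dropWhile (p := fun x => decide (x ≠ '.')) (l := k.toList)]
  rw [← dropWhile_dot k.toList h]

lemma append_dot_cancel (p p0 s s0 : String) (hp : '.' ∉ p.toList) (hp0 : '.' ∉ p0.toList)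
    (h : p ++ "." ++ s = p0 ++ "." ++ s0) : p = p0 ∧ s = s0 := by
  rw [← String.toList_inj, append_dot_toList, append_dot_toList] at h
  have ht : p.toList = p0.toList := by
    have t1 := (shape_take p.toList s.toList hp).1
    have t2 := (shape_take p0.toList s0.toList hp0).1
    rw [← t1, ← t2, h]
  obtain ⟨-, h2⟩ := List.append_inj h (by rw [ht])
  refine ⟨String.toList_inj.mp ht, String.toList_inj.mp (by simpa using h2)⟩

lemma append_dot_one (p : String) : p ++ ".1" = p ++ "." ++ "1" := by
  rw [String.append_assoc, show ("." ++ "1" : String) = ".1" from rfl]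

lemma append_dot_two (p : String) : p ++ ".2" = p ++ "." ++ "2" := by
  rw [String.append_assoc, show ("." ++ "2" : String) = ".2" from rfl]

-- the first piece of key.split('.', 1) is the prefix before the first dot
lemma splitB_head (k : String) : ((PySem.Str.splitMax? k "." 1).getD []).headD "" = prefS k := by
  rw [splitB_parts]
  by_cases h : '.' ∈ k.toList
  · simp [h]
  · simp [h, prefS_of_no_dot k h]

-- B's bucketing pass: ones/twos look up exactly what the table holds at sample.1 / sample.2
lemma bucket_inv (l : List (String × String)) (p : String) (hp : '.' ∉ p.toList) :
    (l.foldl bucketStep (PySem.Dict.empty, PySem.Dict.empty)).1.get? p =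
      (PySem.Dict.mk l).get? (p ++ ".1") ∧
    (l.foldl bucketStep (PySem.Dict.empty, PySem.Dict.empty)).2.get? p =
      (PySem.Dict.mk l).get? (p ++ ".2") := by
  rw [append_dot_one, append_dot_two]
  induction l using List.reverseRecOn with
  | nil =>
    constructor <;> simp [PySem.Dict.get?, PySem.Dict.empty]
  | append_singleton l kv ih =>
    rw [List.foldl_append, List.foldl_cons, List.foldl_nil,
      get?_mk_append_one (k := p ++ "." ++ "1"), get?_mk_append_one (k := p ++ "." ++ "2")]
    by_cases hdot : '.' ∈ kv.1.toList
    · have hparts := splitB_parts kv.1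
      rw [if_pos hdot] at hparts
      have hp0 : '.' ∉ (prefS kv.1).toList := prefS_no_dot kv.1
      have hk : kv.1 = prefS kv.1 ++ "." ++ String.ofList ((kv.1.toList.dropWhile (· ≠ '.')).tail) :=
        key_decomp kv.1 hdot
      set suf := String.ofList ((kv.1.toList.dropWhile (· ≠ '.')).tail) with hsufdef
      by_cases h1 : suf = "1"
      · have hstep : bucketStep (l.foldl bucketStep (PySem.Dict.empty, PySem.Dict.empty)) kv =
            ((l.foldl bucketStep (PySem.Dict.empty, PySem.Dict.empty)).1.setdefault (prefS kv.1) kv.2,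
             (l.foldl bucketStep (PySem.Dict.empty, PySem.Dict.empty)).2) := by
          simp only [bucketStep, hparts, if_pos h1]
        rw [hstep]
        constructor
        · by_cases hpp : p = prefS kv.1
          · subst hpp
            rw [PySem.Dict.get?_setdefault_self,
              if_pos (show kv.1 = prefS kv.1 ++ "." ++ "1" by conv_lhs => rw [hk, h1]), ih.1]
            cases (PySem.Dict.mk l).get? (prefS kv.1 ++ "." ++ "1") <;> simp
          · rw [PySem.Dict.get?_setdefault_of_ne _ _ hpp, ih.1, if_neg, Option.or_none]
            intro he
            exact hpp (append_dot_cancel p (prefS kv.1) "1" suf hp hp0 (he.symm.trans hk)).1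
        · rw [ih.2, if_neg, Option.or_none]
          intro he
          have h22 := (append_dot_cancel p (prefS kv.1) "2" suf hp hp0 (he.symm.trans hk)).2
          exact absurd (h22.trans h1) (by decide)
      · by_cases h2 : suf = "2"
        · have hstep : bucketStep (l.foldl bucketStep (PySem.Dict.empty, PySem.Dict.empty)) kv =
              ((l.foldl bucketStep (PySem.Dict.empty, PySem.Dict.empty)).1,
               (l.foldl bucketStep (PySem.Dict.empty, PySem.Dict.empty)).2.setdefault (prefS kv.1) kv.2) := by
            simp only [bucketStep, hparts, if_neg h1, if_pos h2]
          rw [hstep]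
          constructor
          · rw [ih.1, if_neg, Option.or_none]
            intro he
            have h11 := (append_dot_cancel p (prefS kv.1) "1" suf hp hp0 (he.symm.trans hk)).2
            exact absurd (h11.trans h2) (by decide)
          · by_cases hpp : p = prefS kv.1
            · subst hpp
              rw [PySem.Dict.get?_setdefault_self,
                if_pos (show kv.1 = prefS kv.1 ++ "." ++ "2" by conv_lhs => rw [hk, h2]), ih.2]
              cases (PySem.Dict.mk l).get? (prefS kv.1 ++ "." ++ "2") <;> simp
            · rw [PySem.Dict.get?_setdefault_of_ne _ _ hpp, ih.2, if_neg, Option.or_none]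
              intro he
              exact hpp (append_dot_cancel p (prefS kv.1) "2" suf hp hp0 (he.symm.trans hk)).1
        · have hstep : bucketStep (l.foldl bucketStep (PySem.Dict.empty, PySem.Dict.empty)) kv =
              l.foldl bucketStep (PySem.Dict.empty, PySem.Dict.empty) := by
            simp only [bucketStep, hparts, if_neg h1, if_neg h2]
          rw [hstep]
          constructor
          · rw [ih.1, if_neg, Option.or_none]
            intro he
            exact h1 ((append_dot_cancel p (prefS kv.1) "1" suf hp hp0 (he.symm.trans hk)).2).symm
          · rw [ih.2, if_neg, Option.or_none]
            intro he
            exact h2 ((append_dot_cancel p (prefS kv.1) "2" suf hp hp0 (he.symm.trans hk)).2).symm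
    · have hparts := splitB_parts kv.1
      rw [if_neg hdot] at hparts
      have hstep : bucketStep (l.foldl bucketStep (PySem.Dict.empty, PySem.Dict.empty)) kv =
          l.foldl bucketStep (PySem.Dict.empty, PySem.Dict.empty) := by
        simp only [bucketStep, hparts]
      rw [hstep]
      have hno : ∀ s : String, kv.1 ≠ p ++ "." ++ s := by
        intro s he
        exact hdot (by rw [he, append_dot_toList]; simp)
      constructor
      · rw [ih.1, if_neg (hno "1"), Option.or_none]
      · rw [ih.2, if_neg (hno "2"), Option.or_none]

-- an insert of a pair the dict already holds is a no-op
lemma insert_self {κ ν : Type} [BEq κ] [LawfulBEq κ] (d : PySem.Dict κ ν) (k : κ) (v : ν)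
    (hn : d.keys.Nodup) (h : d.get? k = some v) : d.insert k v = d := by
  apply PySem.Dict.ext
  have hc : d.contains k = true := by rw [PySem.Dict.contains_eq_isSome_get?, h]; rfl
  rw [PySem.Dict.items_insert_of_contains _ _ hc]
  have hcg : ∀ p ∈ d.items, (fun p : κ × ν => if (p.1 == k) = true then (k, v) else p) p = id p := by
    intro p hp
    by_cases hk : p.1 = k
    · have hv : d.get? p.1 = some p.2 := PySem.Dict.get?_of_mem_items d (by simpa using hp) hn
      rw [hk, h] at hv
      have hv2 : v = p.2 := Option.some_inj.mp hv
      simp only [hk, beq_self_eq_true, if_pos, id_eq]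
      exact Prod.ext hk.symm hv2
    · simp [hk]
  rw [List.map_congr_left hcg, List.map_id]

-- 'good' accumulator: every stored entry is the sorted pair the table dictates for its sample
def goodAcc (d : PySem.Dict String String) (r : PySem.Dict String (String × String)) : Prop :=
  ∀ p v, r.get? p = some v →
    ∃ c1 c2, d.get? (p ++ ".1") = some c1 ∧ d.get? (p ++ ".2") = some c2 ∧ v = pairSorted c1 c2

lemma goodAcc_empty (d : PySem.Dict String String) : goodAcc d PySem.Dict.empty := by
  intro p v h
  simp [PySem.Dict.get?, PySem.Dict.empty] at h

lemma stepA_good (d : PySem.Dict String String) (r : PySem.Dict String (String × String))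
    (q : String) (h : goodAcc d r) : goodAcc d (stepA d r q) := by
  unfold stepA
  cases h1 : d.get? (q ++ ".1") with
  | none => exact h
  | some c1 =>
    cases h2 : d.get? (q ++ ".2") with
    | none => exact h
    | some c2 =>
      intro p v hv
      rw [PySem.Dict.get?_insert] at hv
      by_cases hpq : p = q
      · rw [if_pos hpq] at hv
        exact ⟨c1, c2, hpq ▸ h1, hpq ▸ h2, (Option.some_inj.mp hv).symm⟩
      · rw [if_neg hpq] at hv
        exact h p v hv

lemma stepA_nodup (d : PySem.Dict String String) (r : PySem.Dict String (String × String))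
    (q : String) (h : r.keys.Nodup) : (stepA d r q).keys.Nodup := by
  unfold stepA
  cases d.get? (q ++ ".1") with
  | none => exact h
  | some c1 =>
    cases d.get? (q ++ ".2") with
    | none => exact h
    | some c2 => exact PySem.Dict.nodup_keys_insert _ _ _ h

lemma stepA_contains_mono (d : PySem.Dict String String) (r : PySem.Dict String (String × String))
    (q x : String) (h : r.contains x = true) : (stepA d r q).contains x = true := by
  unfold stepA
  cases d.get? (q ++ ".1") with
  | none => exact h
  | some c1 =>
    cases d.get? (q ++ ".2") with
    | none => exact h
    | some c2 => rw [PySem.Dict.contains_insert]; simp [h]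

-- a 'good' accumulator that already holds the sample makes stepA a no-op
lemma stepA_of_contains (d : PySem.Dict String String) (r : PySem.Dict String (String × String))
    (q : String) (hg : goodAcc d r) (hn : r.keys.Nodup) (hc : r.contains q = true) :
    stepA d r q = r := by
  have hs : (r.get? q).isSome := by rw [← PySem.Dict.contains_eq_isSome_get?]; exact hc
  obtain ⟨v, hv⟩ := Option.isSome_iff_exists.mp hs
  obtain ⟨c1, c2, h1, h2, hpair⟩ := hg q v hv
  unfold stepA
  rw [h1, h2]
  show r.insert q (pairSorted c1 c2) = r
  rw [← hpair]
  exact insert_self r q v hn hv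

lemma foldl_stepA_good (d : PySem.Dict String String) (l : List String)
    (r : PySem.Dict String (String × String)) (h : goodAcc d r) :
    goodAcc d (l.foldl (stepA d) r) := by
  induction l generalizing r with
  | nil => exact h
  | cons q rest ih => exact ih _ (stepA_good d r q h)

lemma foldl_stepA_nodup (d : PySem.Dict String String) (l : List String)
    (r : PySem.Dict String (String × String)) (h : r.keys.Nodup) :
    (l.foldl (stepA d) r).keys.Nodup := by
  induction l generalizing r with
  | nil => exact h
  | cons q rest ih => exact ih _ (stepA_nodup d r q h)

lemma foldl_stepA_contains_mono (d : PySem.Dict String String) (l : List String)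
    (r : PySem.Dict String (String × String)) (x : String) (h : r.contains x = true) :
    (l.foldl (stepA d) r).contains x = true := by
  induction l generalizing r with
  | nil => exact h
  | cons q rest ih => exact ih _ (stepA_contains_mono d r q x h)

-- a sample appearing in the list whose pair the table holds ends up in the accumulator
lemma foldl_stepA_contains_of_mem (d : PySem.Dict String String) (l : List String)
    (r : PySem.Dict String (String × String)) (x : String) (hx : x ∈ l)
    (c1 c2 : String) (h1 : d.get? (x ++ ".1") = some c1) (h2 : d.get? (x ++ ".2") = some c2) :
    (l.foldl (stepA d) r).contains x = true := by
  induction l generalizing r with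
  | nil => simp at hx
  | cons q rest ih =>
    rw [List.foldl_cons]
    by_cases hq : x = q
    · apply foldl_stepA_contains_mono
      subst hq
      unfold stepA
      rw [h1, h2, PySem.Dict.contains_insert]
      simp
    · exact ih _ (by rcases List.mem_cons.mp hx with h | h; exact absurd h hq; exact h)

-- folding stepA over the deduplicated prefixes equals folding it over all of them
lemma fold_dedup (d : PySem.Dict String String) (l : List String)
    (r : PySem.Dict String (String × String)) (hg : goodAcc d r) (hn : r.keys.Nodup) :
    (PySem.Set.ofList l).foldl (stepA d) r = l.foldl (stepA d) r := by
  induction l using List.reverseRecOn with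
  | nil => rfl
  | append_singleton l x ih =>
    rw [List.foldl_append, List.foldl_cons, List.foldl_nil, ← ih, ofList_append_one,
      PySem.Set.add_eq_ite]
    by_cases hx : x ∈ PySem.Set.ofList l
    · rw [if_pos hx]
      symm
      cases h1 : d.get? (x ++ ".1") with
      | none => unfold stepA; rw [h1]
      | some c1 =>
        cases h2 : d.get? (x ++ ".2") with
        | none => unfold stepA; rw [h1, h2]
        | some c2 =>
          exact stepA_of_contains d _ x (foldl_stepA_good d _ r hg) (foldl_stepA_nodup d _ r hn)
            (foldl_stepA_contains_of_mem d _ r x hx c1 c2 h1 h2)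
    · rw [if_neg hx, List.foldl_append, List.foldl_cons, List.foldl_nil]

-- B's join step is A's loop body on the key's prefix
lemma joinStep_eq_stepA (d ones twos : PySem.Dict String String)
    (h1 : ∀ p : String, '.' ∉ p.toList → ones.get? p = d.get? (p ++ ".1"))
    (h2 : ∀ p : String, '.' ∉ p.toList → twos.get? p = d.get? (p ++ ".2"))
    (r : PySem.Dict String (String × String)) (k : String)
    (hg : goodAcc d r) (hn : r.keys.Nodup) :
    joinStep ones twos r k = stepA d r (prefS k) := by
  unfold joinStep
  rw [splitB_head]
  by_cases hc : r.contains (prefS k) = true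
  · rw [if_pos hc, stepA_of_contains d r (prefS k) hg hn hc]
  · rw [if_neg hc, h1 _ (prefS_no_dot k), h2 _ (prefS_no_dot k)]
    cases hA : d.get? (prefS k ++ ".1") with
    | none => unfold stepA; rw [hA]
    | some c1 =>
      cases hB : d.get? (prefS k ++ ".2") with
      | none => unfold stepA; rw [hA, hB]
      | some c2 =>
        unfold stepA
        rw [hA, hB]
        show r.insert (prefS k) (if c1 ≤ c2 then (c1, c2) else (c2, c1)) =
          r.insert (prefS k) (pairSorted c1 c2)
        rw [pairSorted_eq]

lemma join_fold (d ones twos : PySem.Dict String String)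
    (h1 : ∀ p : String, '.' ∉ p.toList → ones.get? p = d.get? (p ++ ".1"))
    (h2 : ∀ p : String, '.' ∉ p.toList → twos.get? p = d.get? (p ++ ".2"))
    (ks : List String) (r : PySem.Dict String (String × String))
    (hg : goodAcc d r) (hn : r.keys.Nodup) :
    ks.foldl (joinStep ones twos) r = (ks.map prefS).foldl (stepA d) r := by
  induction ks generalizing r with
  | nil => rfl
  | cons k rest ih =>
    rw [List.map_cons, List.foldl_cons, List.foldl_cons,
      joinStep_eq_stepA d ones twos h1 h2 r k hg hn]
    exact ih _ (stepA_good d r (prefS k) hg) (stepA_nodup d r (prefS k) hn)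

-- ===== VERDICT (by name: the statement is the Claim_ definition above) =====
theorem find_all_diplotypes_spec : Claim_equal_find_all_diplotypes := by
  intro cur_table _
  show find_all_diplotypes cur_table = find_all_diplotypes_alt cur_table
  simp only [find_all_diplotypes, find_all_diplotypes_alt]
  have hmap : cur_table.map (fun kv => ((PySem.Str.split? kv.1 ".").getD []).headD "") =
      cur_table.map (fun kv => prefS kv.1) := List.map_congr_left (fun kv _ => splitA_head kv.1)
  rw [hmap]
  congr 1
  rw [join_fold (PySem.Dict.mk cur_table) _ _
      (fun p hp => (bucket_inv cur_table p hp).1)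
      (fun p hp => (bucket_inv cur_table p hp).2)
      _ _ (goodAcc_empty _) (by simp [PySem.Dict.keys, PySem.Dict.empty]),
    fold_dedup (PySem.Dict.mk cur_table) _ _ (goodAcc_empty _)
      (by simp [PySem.Dict.keys, PySem.Dict.empty]),
    List.map_map]
  rfl
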